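-- pv_equiv track=rewrite | github.com/sahan-vishwajith/My_ProjectEular_solutions | 66.py | second
-- ===== SOURCE A (Python) =====
-- def second(a):
--     x=False
--     n=0
--     y=0
--     b=0
--     while x==False:
--         n+=1
--         y=a[3]*n-a[2]
--         if y**2>a[1]*(a[4]**2):
--             b=y-a[3]
--             d=b*a[3]
--             c=n-1
--             x=True
--             break
--     z=a[1]*(a[4]**2)-b**2
--     if z%a[3]==0:
--         return [c,a[1],b,z//a[3],1]
--     else:
--         return [c,a[1],d,z,a[3]*a[4]]
-- ===== SOURCE B (Python) =====
-- def _isqrt_bits(k, i, s):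
--     # largest s with s*s <= k, for 0 <= k < 2**94, by bit-by-bit binary search
--     if i == 0:
--         return s
--     t = s + (1 << (i - 1))
--     return _isqrt_bits(k, i - 1, t if t * t <= k else s)
--
--
-- def _find_n(K, a2, a3):
--     # smallest n >= 1 with (a3*n - a2)**2 > K
--     if (a3 - a2) ** 2 > K:
--         return 1
--     s = _isqrt_bits(K, 47, 0)
--     if a3 > 0:
--         return (a2 + s) // a3 + 1
--     return (a2 - s) // a3 + 1
--
--
-- def second(a):
--     a1, a2, a3, a4 = a[1], a[2], a[3], a[4]
--     K = a1 * a4 ** 2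
--     n = _find_n(K, a2, a3)
--     b = a3 * n - a2 - a3
--     c = n - 1
--     z = K - b * b
--     if z % a3 == 0:
--         return [c, a1, b, z // a3, 1]
--     return [c, a1, b * a3, z, a3 * a4]
-- ===== Notes on version B (the rewrite author's own statement) =====
-- stated objective: alternative
-- what changed: A scans candidate indices upward one by one until the affine term's square exceeds the bound; B computes that minimal index in closed form with a bit-by-bit integer square root and one floor division (the timing family only grows the list, so no speed-up is measured).
-- outside the precondition, e.g. on second([1, 2, 3]): A raises IndexError, B raises IndexError; on second([1, 2, 3, 0, 4]): A does not finish within the time limit, B raises ZeroDivisionError; on second([0, 1, 9, 0, 1]): A raises ZeroDivisionError, B raises ZeroDivisionError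
import Mathlib
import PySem

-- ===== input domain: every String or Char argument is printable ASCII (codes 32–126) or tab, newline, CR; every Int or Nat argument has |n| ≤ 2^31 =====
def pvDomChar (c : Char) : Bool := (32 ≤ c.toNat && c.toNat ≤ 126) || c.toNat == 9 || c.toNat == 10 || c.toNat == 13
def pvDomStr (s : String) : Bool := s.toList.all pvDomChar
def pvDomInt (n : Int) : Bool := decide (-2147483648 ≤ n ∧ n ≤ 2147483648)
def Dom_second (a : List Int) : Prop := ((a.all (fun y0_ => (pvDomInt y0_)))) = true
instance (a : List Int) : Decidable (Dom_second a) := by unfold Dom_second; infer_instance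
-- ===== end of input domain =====

-- B replaces A's linear scan for the smallest n whose affine term's square exceeds the bound by a
-- closed-form computation using a bit-by-bit integer square root (objective: alternative).

-- ===== PORT A =====
-- the while loop; fuel is only a totality guard (provably sufficient when the divisor is nonzero)
def secondLoop (a1 a2 a3 a4 : Int) : Nat → Int → Int × Int × Int
  | 0, _ => (0, 0, 0)      -- fuel exhausted: unreachable under Pre_second
  | f + 1, n =>
    let n' := n + 1
    let y := a3 * n' - a2
    if y ^ 2 > a1 * a4 ^ 2 then (n' - 1, y - a3, (y - a3) * a3)
    else secondLoop a1 a2 a3 a4 f n'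

def second (a : List Int) : List Int :=
  match PySem.List.pyGet? a 1, PySem.List.pyGet? a 2,
        PySem.List.pyGet? a 3, PySem.List.pyGet? a 4 with
  | some a1, some a2, some a3, some a4 =>
    let fuel := a2.natAbs + (a1 * a4 ^ 2).natAbs + 2
    match secondLoop a1 a2 a3 a4 fuel 0 with
    | (c, b, d) =>
      let z := a1 * a4 ^ 2 - b ^ 2
      if PySem.Int.mod z a3 = 0 then [c, a1, b, PySem.Int.floordiv z a3, 1]
      else [c, a1, d, z, a3 * a4]
  | _, _, _, _ => []       -- IndexError: excluded by Pre_second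

-- ===== PORT B =====
-- _isqrt_bits: '1 << (i-1)' is ported as 2^(i-1) (exact: both arguments nonnegative)
def isqrtBits (k : Int) : Nat → Int → Int
  | 0, s => s
  | i + 1, s =>
    let t := s + 2 ^ i
    isqrtBits k i (if t * t ≤ k then t else s)

def findN (K a2 a3 : Int) : Int :=
  if (a3 - a2) ^ 2 > K then 1
  else
    let s := isqrtBits K 47 0
    if a3 > 0 then PySem.Int.floordiv (a2 + s) a3 + 1
    else PySem.Int.floordiv (a2 - s) a3 + 1

-- the tuple unpacking of the four used elements (IndexError when the list is shorter than five)
def second_alt (a : List Int) : List Int :=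
  (((PySem.List.pyGet? a 1).bind fun a1 =>
    (PySem.List.pyGet? a 2).bind fun a2 =>
    (PySem.List.pyGet? a 3).bind fun a3 =>
    (PySem.List.pyGet? a 4).map fun a4 =>
      let K := a1 * a4 ^ 2
      let n := findN K a2 a3
      let b := a3 * n - a2 - a3
      let c := n - 1
      let z := K - b * b
      if PySem.Int.mod z a3 = 0 then [c, a1, b, PySem.Int.floordiv z a3, 1]
      else [c, a1, b * a3, z, a3 * a4])).getD []

-- ===== PRECONDITION & SPEC =====
-- A raises IndexError on lists shorter than five and raises ZeroDivisionError or loops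
-- forever when the fourth element is zero; Pre_second excludes exactly those inputs.
def Pre_second (a : List Int) : Prop := 5 ≤ a.length ∧ PySem.List.pyGet? a 3 ≠ some 0
instance (a : List Int) : Decidable (Pre_second a) := by unfold Pre_second; infer_instance
def pvWitness_second : List Int := [0, 7, 3, 2, 4]

def Spec_second (a : List Int) (out : List Int) : Prop := out = second_alt a
instance (a : List Int) (out : List Int) : Decidable (Spec_second a out) := by unfold Spec_second; infer_instance

-- ===== CLAIM (what is proved, stated in full; the proofs are below) =====
def Claim_equal_second : Prop := ∀ (a : List Int), Dom_second a → Pre_second a → Spec_second a (second a)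

-- ===== LEMMAS AND PROOFS =====

lemma isqrtBits_bounds (k : Int) :
    ∀ (i : Nat) (s : Int), 0 ≤ s → s * s ≤ k → k < (s + 2 ^ i) * (s + 2 ^ i) →
      0 ≤ isqrtBits k i s ∧ isqrtBits k i s * isqrtBits k i s ≤ k ∧
        k < (isqrtBits k i s + 1) * (isqrtBits k i s + 1) := by
  intro i
  induction i with
  | zero => intro s h0 h1 h2; simpa [isqrtBits] using ⟨h0, h1, by simpa using h2⟩
  | succ i ih =>
    intro s h0 h1 h2
    have hpow : (2 : Int) ^ (i + 1) = 2 ^ i + 2 ^ i := by ring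
    simp only [isqrtBits]
    by_cases ht : (s + 2 ^ i) * (s + 2 ^ i) ≤ k
    · have := ih (s + 2 ^ i) (by positivity) ht (by rw [hpow] at h2; linarith [h2])
      simpa [ht] using this
    · have := ih s h0 h1 (by linarith [lt_of_not_ge ht])
      simpa [ht] using this

-- characterisation: y² > k ↔ |y| ≥ s+1, given s = isqrt k
lemma sq_gt_iff (s k y : Int) (h0 : 0 ≤ s) (h1 : s * s ≤ k) (h2 : k < (s + 1) * (s + 1)) :
    (y ^ 2 > k ↔ s + 1 ≤ y ∨ y ≤ -(s + 1)) := by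
  constructor
  · intro h
    by_contra hc
    push_neg at hc
    obtain ⟨hy1, hy2⟩ := hc
    nlinarith [sq_nonneg y, sq_nonneg (y - s), sq_nonneg (y + s)]
  · rintro (h | h) <;> nlinarith

lemma secondLoop_eq (a1 a2 a3 a4 m : Int)
    (hP : (a3 * m - a2) ^ 2 > a1 * a4 ^ 2) :
    ∀ (f : Nat) (n : Int), n < m →
      (∀ k, n < k → k < m → ¬ ((a3 * k - a2) ^ 2 > a1 * a4 ^ 2)) →
      m - n ≤ (f : Int) →
      secondLoop a1 a2 a3 a4 f n =
        (m - 1, a3 * m - a2 - a3, (a3 * m - a2 - a3) * a3) := by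
  intro f
  induction f with
  | zero => intro n hn _ hf; exfalso; omega
  | succ f ih =>
    intro n hn hmin hf
    simp only [secondLoop]
    rcases eq_or_lt_of_le (by omega : n + 1 ≤ m) with he | hl
    · rw [he]; simp [hP]
    · have hnot : ¬ ((a3 * (n + 1) - a2) ^ 2 > a1 * a4 ^ 2) :=
        hmin (n + 1) (by omega) hl
      simp only [hnot, ite_false]
      exact ih (n + 1) hl (fun k hk1 hk2 => hmin k (by omega) hk2) (by omega)

lemma findN_spec (K a2 a3 : Int) (h3 : a3 ≠ 0) (hK : K < 2 ^ 94) :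
    (a3 * findN K a2 a3 - a2) ^ 2 > K ∧ 1 ≤ findN K a2 a3 ∧
      ∀ k, 1 ≤ k → k < findN K a2 a3 → ¬ ((a3 * k - a2) ^ 2 > K) := by
  by_cases hP1 : (a3 - a2) ^ 2 > K
  · refine ⟨by simp [findN, hP1], by simp [findN, hP1], ?_⟩
    intro k hk1 hk2
    simp [findN, hP1] at hk2
    omega
  · have hK0 : 0 ≤ K := le_trans (sq_nonneg (a3 - a2)) (le_of_not_gt hP1)
    obtain ⟨hs0, hs1, hs2⟩ := isqrtBits_bounds K 47 0 le_rfl (by simpa using hK0)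
      (by norm_num; linarith)
    by_cases ha3 : 0 < a3
    · rw [show findN K a2 a3 = PySem.Int.floordiv (a2 + isqrtBits K 47 0) a3 + 1 by
        simp only [findN, if_neg hP1, if_pos ha3]]
      generalize hsg : isqrtBits K 47 0 = s at hs0 hs1 hs2 ⊢
      have hiff : ∀ y : Int, (y ^ 2 > K ↔ s + 1 ≤ y ∨ y ≤ -(s + 1)) :=
        fun y => sq_gt_iff s K y hs0 hs1 hs2
      have h1 : -s ≤ a3 - a2 ∧ a3 - a2 ≤ s := by
        have := (hiff (a3 - a2)).not.mp hP1
        push_neg at this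
        omega
      set q := PySem.Int.floordiv (a2 + s) a3 with hq
      have hqb : q * a3 ≤ a2 + s ∧ a2 + s < (q + 1) * a3 :=
        (PySem.Int.floordiv_eq_iff_of_pos ha3).mp hq.symm
      have hq1 : 1 ≤ q := (PySem.Int.le_floordiv_iff_mul_le ha3).mpr (by linarith [h1.1])
      refine ⟨?_, by omega, ?_⟩
      · rw [hiff]
        left
        nlinarith [hqb.2]
      · intro k hk1 hk2
        rw [hiff]
        push_neg
        constructor
        · nlinarith [hqb.1, mul_le_mul_of_nonneg_left (by omega : k ≤ q) (le_of_lt ha3)]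
        · nlinarith [mul_le_mul_of_nonneg_left (by omega : (1:Int) ≤ k) (le_of_lt ha3)]
    · have ha3' : 0 < -a3 := by omega
      have hswap : ∀ t : Int, PySem.Int.floordiv (a2 - t) a3 = PySem.Int.floordiv (t - a2) (-a3) := by
        intro t
        have e1 : a2 - t = -(t - a2) := by ring
        have e2 : a3 = -(-a3) := by ring
        rw [e1]
        conv_lhs => rw [e2]
        rw [PySem.Int.floordiv_neg_neg]
      rw [show findN K a2 a3 = PySem.Int.floordiv (isqrtBits K 47 0 - a2) (-a3) + 1 by
        simp only [findN, if_neg hP1, if_neg ha3]; rw [hswap]]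
      generalize hsg : isqrtBits K 47 0 = s at hs0 hs1 hs2 ⊢
      have hiff : ∀ y : Int, (y ^ 2 > K ↔ s + 1 ≤ y ∨ y ≤ -(s + 1)) :=
        fun y => sq_gt_iff s K y hs0 hs1 hs2
      have h1 : -s ≤ a3 - a2 ∧ a3 - a2 ≤ s := by
        have := (hiff (a3 - a2)).not.mp hP1
        push_neg at this
        omega
      set q := PySem.Int.floordiv (s - a2) (-a3) with hq
      have hqb : q * -a3 ≤ s - a2 ∧ s - a2 < (q + 1) * -a3 :=
        (PySem.Int.floordiv_eq_iff_of_pos ha3').mp hq.symm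
      have hq1 : 1 ≤ q := (PySem.Int.le_floordiv_iff_mul_le ha3').mpr (by linarith [h1.2])
      refine ⟨?_, by omega, ?_⟩
      · rw [hiff]
        right
        nlinarith [hqb.2]
      · intro k hk1 hk2
        rw [hiff]
        push_neg
        constructor
        · nlinarith [mul_le_mul_of_nonneg_left (by omega : (1:Int) ≤ k) (le_of_lt ha3')]
        · nlinarith [hqb.1, mul_le_mul_of_nonneg_left (by omega : k ≤ q) (le_of_lt ha3')]

lemma findN_le_fuel (K a2 a3 : Int) (h3 : a3 ≠ 0) (hK : K < 2 ^ 94) :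
    findN K a2 a3 ≤ ((a2.natAbs + K.natAbs + 2 : Nat) : Int) := by
  obtain ⟨hP, hpos, hmin⟩ := findN_spec K a2 a3 h3 hK
  have hNa : ((a2.natAbs + K.natAbs + 2 : Nat) : Int) = |a2| + |K| + 2 := by
    push_cast [Int.natCast_natAbs]
    ring
  by_contra hc
  push_neg at hc
  rw [hNa] at hc
  have ha2 := abs_nonneg a2
  have haK := abs_nonneg K
  have hM0 : (0:Int) ≤ |a2| + |K| + 2 := by linarith
  have hMabs : (|a2| + |K| + 2) ≤ |a3 * (|a2| + |K| + 2)| := by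
    rw [abs_mul, abs_of_nonneg hM0]
    have h1 : (1:Int) ≤ |a3| := Int.one_le_abs h3
    nlinarith
  have habs : |K| + 2 ≤ |a3 * (|a2| + |K| + 2) - a2| := by
    have := abs_sub_abs_le_abs_sub (a3 * (|a2| + |K| + 2)) a2
    linarith
  have hPN : (a3 * (|a2| + |K| + 2) - a2) ^ 2 > K := by
    have hmm : (|K| + 2) * (|K| + 2) ≤
        |a3 * (|a2| + |K| + 2) - a2| * |a3 * (|a2| + |K| + 2) - a2| :=
      mul_le_mul habs habs (by positivity) (abs_nonneg _)
    rw [abs_mul_abs_self] at hmm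
    nlinarith [le_abs_self K]
  exact hmin _ (by linarith) hc hPN

-- ===== VERDICT (by name: the statement is the Claim_ definition above) =====
theorem second_spec : Claim_equal_second := by
  intro a hdom hpre
  unfold Spec_second
  obtain ⟨h5, h30⟩ := hpre
  rcases a with _ | ⟨x0, _ | ⟨x1, _ | ⟨x2, _ | ⟨x3, _ | ⟨x4, rest⟩⟩⟩⟩⟩ <;> simp at h5
  have g1 : PySem.List.pyGet? (x0::x1::x2::x3::x4::rest) (1:Int) = some x1 := by
    have := PySem.List.pyGet?_ofNat (x0::x1::x2::x3::x4::rest) 1 (by simp)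
    norm_num at this
    simpa using this
  have g2 : PySem.List.pyGet? (x0::x1::x2::x3::x4::rest) (2:Int) = some x2 := by
    have := PySem.List.pyGet?_ofNat (x0::x1::x2::x3::x4::rest) 2 (by simp)
    norm_num at this
    simpa using this
  have g3 : PySem.List.pyGet? (x0::x1::x2::x3::x4::rest) (3:Int) = some x3 := by
    have := PySem.List.pyGet?_ofNat (x0::x1::x2::x3::x4::rest) 3 (by simp)
    norm_num at this
    simpa using this
  have g4 : PySem.List.pyGet? (x0::x1::x2::x3::x4::rest) (4:Int) = some x4 := by
    have := PySem.List.pyGet?_ofNat (x0::x1::x2::x3::x4::rest) 4 (by simp)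
    norm_num at this
    simpa using this
  have h3 : x3 ≠ 0 := by
    rw [g3] at h30
    simpa using h30
  simp only [Dom_second, List.all_cons, Bool.and_eq_true, pvDomInt, decide_eq_true_eq] at hdom
  obtain ⟨-, ⟨hb1l, hb1r⟩, ⟨-, -⟩, ⟨-, -⟩, ⟨hb4l, hb4r⟩, -⟩ := hdom
  have h4sq : x4 ^ 2 ≤ 2 ^ 62 := by nlinarith
  have hK : x1 * x4 ^ 2 < 2 ^ 94 := by nlinarith [sq_nonneg x4]
  obtain ⟨hP, h1n, hmin⟩ := findN_spec (x1 * x4 ^ 2) x2 x3 h3 hK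
  have hle := findN_le_fuel (x1 * x4 ^ 2) x2 x3 h3 hK
  have hloop := secondLoop_eq x1 x2 x3 x4 (findN (x1 * x4 ^ 2) x2 x3) hP
    (x2.natAbs + (x1 * x4 ^ 2).natAbs + 2) 0 (by omega)
    (fun k hk1 hk2 => hmin k (by omega) hk2) (by push_cast at hle ⊢; omega)
  simp only [second, second_alt, g1, g2, g3, g4]
  rw [hloop]
  simp [pow_two]
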